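-- pv_equiv track=rewrite | github.com/apeltop/learning | algorithm/programmers/17338_3.py | solution
-- ===== SOURCE A (Python) =====
-- import collections
--
-- def solution(v):
--     def checkFarm(y, x, crop):
--         if crop == v[y][x]:
--             v[y][x] = -1
--         else:
--             return
--
--         if not y == 0:
--             checkFarm(y - 1, x, crop)
--         if not y == len(v) - 1:
--             checkFarm(y + 1, x, crop)
--         if not x == 0:
--             checkFarm(y, x - 1, crop)
--         if not x == len(v[y]) - 1:
--             checkFarm(y, x + 1, crop)
--
--         return crop
--
--     answer = []
--     count = collections.defaultdict(int)
--
--     for i in range(len(v)):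
--         for j in range(len(v[i])):
--             if v[i][j] == -1:
--                 continue
--
--             count[checkFarm(i, j, v[i][j])] += 1
--
--     answer.append(count[0])
--     answer.append(count[1])
--     answer.append(count[2])
--
--     return answer
-- ===== SOURCE B (Python) =====
-- def solution(v):
--     g = [row[:] for row in v]
--     counts = {}
--     for i in range(len(g)):
--         for j in range(len(g[i])):
--             crop = g[i][j]
--             if crop == -1:
--                 continue
--             stack = [(i, j)]
--             while stack:
--                 y, x = stack.pop()
--                 if 0 <= y < len(g) and 0 <= x < len(g[y]) and g[y][x] == crop:
--                     g[y][x] = -1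
--                     stack.append((y, x + 1))
--                     stack.append((y, x - 1))
--                     stack.append((y + 1, x))
--                     stack.append((y - 1, x))
--             counts[crop] = counts.get(crop, 0) + 1
--     return [counts.get(c, 0) for c in (0, 1, 2)]
-- ===== Notes on version B (the rewrite author's own statement) =====
-- stated objective: alternative
-- what changed: The recursive flood fill is replaced by an iterative explicit-stack fill that bounds-checks coordinates when popping and counts with a plain dict (and B works on a copy, leaving the input grid unmutated where A sets every visited cell to -1).
-- outside the precondition, e.g. on solution([[-1], [-1, -1]]): A returns [0, 0, 0], B returns [0, 0, 0]
import Mathlib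
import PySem

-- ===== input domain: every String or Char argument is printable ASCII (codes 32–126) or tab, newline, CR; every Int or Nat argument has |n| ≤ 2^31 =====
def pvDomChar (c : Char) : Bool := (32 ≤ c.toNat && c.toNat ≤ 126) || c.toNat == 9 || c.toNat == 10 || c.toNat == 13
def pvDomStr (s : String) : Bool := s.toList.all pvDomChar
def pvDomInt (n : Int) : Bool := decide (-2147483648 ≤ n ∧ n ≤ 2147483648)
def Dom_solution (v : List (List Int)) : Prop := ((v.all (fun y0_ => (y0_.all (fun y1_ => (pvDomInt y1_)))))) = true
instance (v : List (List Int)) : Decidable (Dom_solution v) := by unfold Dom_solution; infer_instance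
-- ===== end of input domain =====

-- B replaces A's recursive flood fill by an iterative explicit-stack fill (alternative decomposition);
-- A mutates its argument grid in place, B works on a copy — the equivalence proved here is about the return value.

-- ===== PORT A =====
-- grid cell read: v[y][x]; out of range yields -1 (Python A raises there; such inputs are outside Pre_solution)
def getCell : List (List Int) → Nat → Nat → Int
  | [], _, _ => -1
  | r :: _, 0, x => r.getD x (-1)
  | _ :: rs, y+1, x => getCell rs y x

-- grid cell write: v[y][x] = c (no-op out of range, unreachable under the ports' guards)
def setCell : List (List Int) → Nat → Nat → Int → List (List Int)
  | [], _, _, _ => []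
  | r :: rs, 0, x, c => r.set x c :: rs
  | r :: rs, y+1, x, c => r :: setCell rs y x c

-- len(v[y])
def rowLen : List (List Int) → Nat → Nat
  | [], _ => 0
  | r :: _, 0 => r.length
  | _ :: rs, y+1 => rowLen rs y

def totalCells (g : List (List Int)) : Nat := (g.map List.length).sum

-- literal port of A's recursive checkFarm; the fuel only makes the recursion total
-- (totalCells v + 1 is enough, proved below); it returns the mutated grid — the Python
-- return value is always `crop` at the outer loop's call site (the guard there guarantees the first match)
def checkFarmA : Nat → List (List Int) → Nat → Nat → Int → List (List Int)
  | 0, g, _, _, _ => g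
  | fuel+1, g, y, x, crop =>
    if crop = getCell g y x then
      let g1 := setCell g y x (-1)
      let g2 := if y ≠ 0 then checkFarmA fuel g1 (y-1) x crop else g1
      let g3 := if y ≠ g2.length - 1 then checkFarmA fuel g2 (y+1) x crop else g2
      let g4 := if x ≠ 0 then checkFarmA fuel g3 y (x-1) crop else g3
      if x ≠ rowLen g4 y - 1 then checkFarmA fuel g4 y (x+1) crop else g4
    else g

def solution (v : List (List Int)) : List Int :=
  let fuel := totalCells v + 1
  let st :=
    (List.range v.length).foldl (fun (st : List (List Int) × PySem.Dict Int Int) i =>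
      (List.range (rowLen st.1 i)).foldl (fun st j =>
        if getCell st.1 i j = -1 then st
        else
          let crop := getCell st.1 i j   -- checkFarm(i, j, crop) returns crop here (its first guard matches)
          (checkFarmA fuel st.1 i j crop, st.2.insert crop (st.2.getD crop 0 + 1))) st)
      (v, PySem.Dict.empty)
  -- count[0], count[1], count[2]: defaultdict reads, value-faithful via getD 0
  [st.2.getD 0 0, st.2.getD 1 0, st.2.getD 2 0]

-- ===== PORT B =====
-- literal port of Source B's while-loop over the explicit stack: the list head is the top of the
-- stack (Python pops from the end and pushes right,left,down,up, so up is popped first);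
-- the fuel only makes the loop total (4 * totalCells v + 5 is enough, proved below)
def fillB : Nat → List (List Int) → List (Int × Int) → Int → List (List Int)
  | 0, g, _, _ => g
  | _+1, g, [], _ => g
  | fuel+1, g, (y, x) :: rest, crop =>
    if 0 ≤ y ∧ y < (g.length : Int) ∧ 0 ≤ x ∧ x < (rowLen g y.toNat : Int) ∧ getCell g y.toNat x.toNat = crop then
      fillB fuel (setCell g y.toNat x.toNat (-1)) ((y-1, x) :: (y+1, x) :: (y, x-1) :: (y, x+1) :: rest) crop
    else fillB fuel g rest crop

def solution_alt (v : List (List Int)) : List Int :=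
  let fuel := 4 * totalCells v + 5
  let st :=
    (List.range v.length).foldl (fun (st : List (List Int) × PySem.Dict Int Int) i =>
      (List.range (rowLen st.1 i)).foldl (fun st j =>
        let crop := getCell st.1 i j
        if crop = -1 then st
        else (fillB fuel st.1 [((i : Int), (j : Int))] crop,
              st.2.insert crop (st.2.getD crop 0 + 1))) st)
      (v, PySem.Dict.empty)
  [st.2.getD 0 0, st.2.getD 1 0, st.2.getD 2 0]

-- ===== PRECONDITION & SPEC =====
-- Pre_ excludes ragged grids (rows of unequal length): on those A's recursive fill indexes a vertical
-- neighbour row at the current column and generally raises IndexError; the few ragged grids on which A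
-- happens to return (no fill step ever reaches a too-short row) are excluded with them — B returns the
-- same value there anyway (see cites).
def Pre_solution (v : List (List Int)) : Prop := ∀ r ∈ v, r.length = (v.headD []).length
instance (v : List (List Int)) : Decidable (Pre_solution v) := by unfold Pre_solution; infer_instance
def pvWitness_solution : List (List Int) := [[0, 1, 1], [0, -1, 2], [0, 2, 2]]

def Spec_solution (v : List (List Int)) (out : List Int) : Prop := out = solution_alt v
instance (v : List (List Int)) (out : List Int) : Decidable (Spec_solution v out) := by unfold Spec_solution; infer_instance

-- ===== CLAIM (what is proved, stated in full; the proofs are below) =====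
def Claim_equal_solution : Prop := ∀ (v : List (List Int)), Dom_solution v → Pre_solution v → Spec_solution v (solution v)

-- ===== LEMMAS AND PROOFS =====

-- number of cells of g equal to c (the fills' termination measure)
def cnt (g : List (List Int)) (c : Int) : Nat := (g.map (fun r => r.count c)).sum

-- one A-style fill step at an Int coordinate (the function B's stack fold is shown to compute)
def stepA (c : Int) (g : List (List Int)) : Int × Int → List (List Int)
  | (y, x) => if 0 ≤ y ∧ 0 ≤ x then checkFarmA (cnt g c + 1) g y.toNat x.toNat c else g

lemma shape_setCell (g : List (List Int)) (y x : Nat) (c : Int) :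
    (setCell g y x c).map List.length = g.map List.length := by
  induction g generalizing y with
  | nil => rfl
  | cons r rs ih => cases y <;> simp [setCell, ih]

lemma getCell_of_len_le {g : List (List Int)} {y : Nat} (x : Nat) (h : g.length ≤ y) :
    getCell g y x = -1 := by
  induction g generalizing y with
  | nil => rfl
  | cons r rs ih =>
    cases y with
    | zero => simp at h
    | succ n => exact ih (by simpa using h)

lemma getCell_of_rowLen_le {g : List (List Int)} {y x : Nat} (h : rowLen g y ≤ x) :
    getCell g y x = -1 := by
  induction g generalizing y with
  | nil => rfl
  | cons r rs ih =>
    cases y with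
    | zero => exact List.getD_eq_default _ _ (by simpa [rowLen] using h)
    | succ n => exact ih (by simpa [rowLen] using h)

lemma count_set_lt {l : List Int} {x : Nat} {c : Int} (hc : c ≠ -1) (h : l.getD x (-1) = c) :
    (l.set x (-1)).count c + 1 = l.count c := by
  induction l generalizing x with
  | nil => simp [List.getD] at h; exact absurd h.symm hc
  | cons a l ih =>
    cases x with
    | zero =>
      simp only [List.getD_cons_zero] at h
      subst h
      simp [Ne.symm hc]
    | succ n =>
      simp only [List.getD_cons_succ] at h
      simp [List.count_cons, ← ih h]
      omega

lemma count_set_le {l : List Int} (x : Nat) {c : Int} (hc : c ≠ -1) :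
    (l.set x (-1)).count c ≤ l.count c := by
  induction l generalizing x with
  | nil => simp
  | cons a l ih =>
    cases x with
    | zero => simp [List.count_cons, Ne.symm hc]
    | succ n => simp [List.count_cons]; have := ih (x := n); omega

lemma cnt_cons (r : List Int) (rs : List (List Int)) (c : Int) :
    cnt (r :: rs) c = r.count c + cnt rs c := by
  simp [cnt]

lemma cnt_setCell {g : List (List Int)} {y x : Nat} {c : Int} (hc : c ≠ -1)
    (h : getCell g y x = c) : cnt (setCell g y x (-1)) c + 1 = cnt g c := by
  induction g generalizing y with
  | nil => exact absurd h.symm hc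
  | cons r rs ih =>
    cases y with
    | zero =>
      simp only [getCell] at h
      simp only [setCell, cnt_cons]
      have := count_set_lt hc h
      omega
    | succ n =>
      simp only [getCell] at h
      simp only [setCell, cnt_cons]
      have := ih h
      omega

lemma cnt_setCell_le (g : List (List Int)) (y x : Nat) {c : Int} (hc : c ≠ -1) :
    cnt (setCell g y x (-1)) c ≤ cnt g c := by
  induction g generalizing y with
  | nil => simp [setCell]
  | cons r rs ih =>
    cases y with
    | zero => simp only [setCell, cnt_cons]; have := count_set_le (l := r) x hc; omega
    | succ n => simp only [setCell, cnt_cons]; have := ih (y := n); omega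

lemma cnt_pos {g : List (List Int)} {y x : Nat} {c : Int} (hc : c ≠ -1)
    (h : getCell g y x = c) : 1 ≤ cnt g c := by
  induction g generalizing y with
  | nil => exact absurd h.symm hc
  | cons r rs ih =>
    cases y with
    | zero =>
      simp only [getCell] at h
      rcases Nat.lt_or_ge x r.length with hx | hx
      · have hm : c ∈ r := by
          rw [List.getD_eq_getElem r (-1) hx] at h
          exact h ▸ List.getElem_mem hx
        have := List.count_pos_iff.mpr hm
        rw [cnt_cons]; omega
      · rw [List.getD_eq_default _ _ hx] at h; exact absurd h.symm hc
    | succ n =>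
      simp only [getCell] at h
      have := ih h
      rw [cnt_cons]; omega

lemma cnt_le_total (g : List (List Int)) (c : Int) : cnt g c ≤ totalCells g := by
  unfold cnt totalCells
  exact List.sum_le_sum (fun r _ => List.count_le_length)

lemma shape_checkFarmA (f : Nat) (g : List (List Int)) (y x : Nat) (c : Int) :
    (checkFarmA f g y x c).map List.length = g.map List.length := by
  induction f generalizing g y x with
  | zero => rfl
  | succ n ih =>
    by_cases hm : c = getCell g y x
    · simp only [checkFarmA, if_pos hm]
      split_ifs <;> simp [ih, shape_setCell]
    · simp [checkFarmA, hm]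

lemma cnt_checkFarmA_le (f : Nat) (g : List (List Int)) (y x : Nat) {c : Int} (hc : c ≠ -1) :
    cnt (checkFarmA f g y x c) c ≤ cnt g c := by
  induction f generalizing g y x with
  | zero => simp [checkFarmA]
  | succ n ih =>
    by_cases hm : c = getCell g y x
    · simp only [checkFarmA, if_pos hm]
      have step : ∀ (P : Prop) [Decidable P] (g' : List (List Int)) (y' x' : Nat),
          cnt (if P then checkFarmA n g' y' x' c else g') c ≤ cnt g' c := by
        intro P _ g' y' x'; split
        · exact ih g' y' x'
        · exact le_refl _
      exact le_trans (step _ _ _ _) (le_trans (step _ _ _ _)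
        (le_trans (step _ _ _ _) (le_trans (step _ _ _ _) (cnt_setCell_le g y x hc))))
    · simp [checkFarmA, hm]

lemma checkFarmA_nomatch {g : List (List Int)} {y x : Nat} {c : Int}
    (h : c ≠ getCell g y x) (f : Nat) : checkFarmA f g y x c = g := by
  cases f with
  | zero => rfl
  | succ n => simp [checkFarmA, h]

lemma checkFarmA_fuel {c : Int} (hc : c ≠ -1) :
    ∀ (f1 f2 : Nat) (g : List (List Int)) (y x : Nat), cnt g c + 1 ≤ f1 → cnt g c + 1 ≤ f2 →
    checkFarmA f1 g y x c = checkFarmA f2 g y x c := by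
  intro f1
  induction f1 with
  | zero => intro f2 g y x h1 _; omega
  | succ n ih =>
    intro f2 g y x h1 h2
    cases f2 with
    | zero => omega
    | succ m =>
      by_cases hm : c = getCell g y x
      · have hpos : 1 ≤ cnt g c := cnt_pos hc hm.symm
        have hcnt : cnt (setCell g y x (-1)) c + 1 = cnt g c := cnt_setCell hc hm.symm
        simp only [checkFarmA, if_pos hm]
        set g1 := setCell g y x (-1) with hg1
        have e2 : (if y ≠ 0 then checkFarmA n g1 (y-1) x c else g1)
                = (if y ≠ 0 then checkFarmA m g1 (y-1) x c else g1) := by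
          split
          · exact ih m g1 (y-1) x (by omega) (by omega)
          · rfl
        rw [e2]
        set g2 := (if y ≠ 0 then checkFarmA m g1 (y-1) x c else g1) with hg2
        have b2 : cnt g2 c ≤ cnt g1 c := by
          rw [hg2]; split
          · exact cnt_checkFarmA_le m g1 (y-1) x hc
          · exact le_refl _
        have e3 : (if y ≠ g2.length - 1 then checkFarmA n g2 (y+1) x c else g2)
                = (if y ≠ g2.length - 1 then checkFarmA m g2 (y+1) x c else g2) := by
          split
          · exact ih m g2 (y+1) x (by omega) (by omega)
          · rfl
        rw [e3]
        set g3 := (if y ≠ g2.length - 1 then checkFarmA m g2 (y+1) x c else g2) with hg3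
        have b3 : cnt g3 c ≤ cnt g2 c := by
          rw [hg3]; split
          · exact cnt_checkFarmA_le m g2 (y+1) x hc
          · exact le_refl _
        have e4 : (if x ≠ 0 then checkFarmA n g3 y (x-1) c else g3)
                = (if x ≠ 0 then checkFarmA m g3 y (x-1) c else g3) := by
          split
          · exact ih m g3 y (x-1) (by omega) (by omega)
          · rfl
        rw [e4]
        set g4 := (if x ≠ 0 then checkFarmA m g3 y (x-1) c else g3) with hg4
        have b4 : cnt g4 c ≤ cnt g3 c := by
          rw [hg4]; split
          · exact cnt_checkFarmA_le m g3 y (x-1) hc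
          · exact le_refl _
        split
        · exact ih m g4 y (x+1) (by omega) (by omega)
        · rfl
      · rw [checkFarmA_nomatch hm, checkFarmA_nomatch hm]

-- the core correspondence: one A-style recursive fill at a matching in-bounds cell equals
-- the four stepA applications that B's stack discipline performs after popping that cell
lemma shape_ifA {g : List (List Int)} {P : Prop} [Decidable P] {G : List (List Int)}
    (hG : G.map List.length = g.map List.length) (f : Nat) (y x : Nat) (c : Int) :
    (if P then checkFarmA f G y x c else G).map List.length = g.map List.length := by
  split
  · exact (shape_checkFarmA _ _ _ _ _).trans hG
  · exact hG

lemma cnt_ifA {P : Prop} [Decidable P] {G : List (List Int)} {c : Int} (hc : c ≠ -1)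
    (f : Nat) (y x : Nat) : cnt (if P then checkFarmA f G y x c else G) c ≤ cnt G c := by
  split
  · exact cnt_checkFarmA_le _ _ _ _ hc
  · exact le_refl _

lemma stepA_up {c : Int} (hc : c ≠ -1) {G : List (List Int)} {y x : Int} {F : Nat}
    (hy : 0 ≤ y) (hx : 0 ≤ x) (hF : cnt G c + 1 ≤ F) :
    stepA c G (y-1, x) = if y.toNat ≠ 0 then checkFarmA F G (y.toNat - 1) x.toNat c else G := by
  by_cases h0 : y.toNat = 0
  · have hneg : ¬(0 ≤ y - 1 ∧ 0 ≤ x) := by rintro ⟨h, -⟩; omega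
    simp only [stepA]
    rw [if_neg hneg, if_neg (not_not_intro h0)]
  · have h01 : (0:Int) ≤ y - 1 := by omega
    have ht : (y - 1).toNat = y.toNat - 1 := by omega
    simp only [stepA]
    rw [if_pos ⟨h01, hx⟩, ht, if_pos h0]
    exact checkFarmA_fuel hc _ _ _ _ _ (le_refl _) hF

lemma stepA_down {c : Int} (hc : c ≠ -1) {G : List (List Int)} {y x : Int} {F : Nat}
    (hy : 0 ≤ y) (hx : 0 ≤ x) (hF : cnt G c + 1 ≤ F) :
    stepA c G (y+1, x) = if y.toNat ≠ G.length - 1 then checkFarmA F G (y.toNat + 1) x.toNat c else G := by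
  have ht : (y + 1).toNat = y.toNat + 1 := by omega
  simp only [stepA]
  rw [if_pos ⟨by omega, hx⟩, ht]
  by_cases hedge : y.toNat = G.length - 1
  · have hoob : getCell G (y.toNat + 1) x.toNat = -1 := getCell_of_len_le _ (by omega)
    rw [if_neg (not_not_intro hedge), checkFarmA_nomatch (fun hEq => hc (hEq.trans hoob)) _]
  · rw [if_pos hedge]
    exact checkFarmA_fuel hc _ _ _ _ _ (le_refl _) hF

lemma stepA_left {c : Int} (hc : c ≠ -1) {G : List (List Int)} {y x : Int} {F : Nat}
    (hy : 0 ≤ y) (hx : 0 ≤ x) (hF : cnt G c + 1 ≤ F) :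
    stepA c G (y, x-1) = if x.toNat ≠ 0 then checkFarmA F G y.toNat (x.toNat - 1) c else G := by
  by_cases h0 : x.toNat = 0
  · have hneg : ¬(0 ≤ y ∧ 0 ≤ x - 1) := by rintro ⟨-, h⟩; omega
    simp only [stepA]
    rw [if_neg hneg, if_neg (not_not_intro h0)]
  · have h01 : (0:Int) ≤ x - 1 := by omega
    have ht : (x - 1).toNat = x.toNat - 1 := by omega
    simp only [stepA]
    rw [if_pos ⟨hy, h01⟩, ht, if_pos h0]
    exact checkFarmA_fuel hc _ _ _ _ _ (le_refl _) hF

lemma stepA_right {c : Int} (hc : c ≠ -1) {G : List (List Int)} {y x : Int} {F : Nat}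
    (hy : 0 ≤ y) (hx : 0 ≤ x) (hF : cnt G c + 1 ≤ F) :
    stepA c G (y, x+1) = if x.toNat ≠ rowLen G y.toNat - 1 then checkFarmA F G y.toNat (x.toNat + 1) c else G := by
  have ht : (x + 1).toNat = x.toNat + 1 := by omega
  simp only [stepA]
  rw [if_pos ⟨hy, by omega⟩, ht]
  by_cases hedge : x.toNat = rowLen G y.toNat - 1
  · have hoob : getCell G y.toNat (x.toNat + 1) = -1 := getCell_of_rowLen_le (by omega)
    rw [if_neg (not_not_intro hedge), checkFarmA_nomatch (fun hEq => hc (hEq.trans hoob)) _]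
  · rw [if_pos hedge]
    exact checkFarmA_fuel hc _ _ _ _ _ (le_refl _) hF

-- the core correspondence: one A-style recursive fill at a matching in-bounds cell equals
-- the four stepA applications that B's stack discipline performs after popping that cell
lemma stepA_match {c : Int} (hc : c ≠ -1) {g : List (List Int)} {y x : Int}
    (hy : 0 ≤ y) (hx : 0 ≤ x) (hcell : getCell g y.toNat x.toNat = c) :
    stepA c g (y, x) =
      stepA c (stepA c (stepA c (stepA c (setCell g y.toNat x.toNat (-1)) (y-1, x)) (y+1, x)) (y, x-1)) (y, x+1) := by
  have hcnt1 : cnt (setCell g y.toNat x.toNat (-1)) c + 1 = cnt g c := cnt_setCell hc hcell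
  have hshape1 : (setCell g y.toNat x.toNat (-1)).map List.length = g.map List.length := shape_setCell g y.toNat x.toNat (-1)
  have E1 : stepA c (setCell g y.toNat x.toNat (-1)) (y-1, x) = (if y.toNat ≠ 0 then checkFarmA (cnt g c) (setCell g y.toNat x.toNat (-1)) (y.toNat - 1) x.toNat c else (setCell g y.toNat x.toNat (-1))) := stepA_up hc hy hx (le_of_eq hcnt1)
  have hshapeT1 : (if y.toNat ≠ 0 then checkFarmA (cnt g c) (setCell g y.toNat x.toNat (-1)) (y.toNat - 1) x.toNat c else (setCell g y.toNat x.toNat (-1))).map List.length = g.map List.length := shape_ifA hshape1 _ _ _ _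
  have hleT1 : cnt (if y.toNat ≠ 0 then checkFarmA (cnt g c) (setCell g y.toNat x.toNat (-1)) (y.toNat - 1) x.toNat c else (setCell g y.toNat x.toNat (-1))) c ≤ cnt (setCell g y.toNat x.toNat (-1)) c := cnt_ifA hc _ _ _
  have hcntT1 : cnt (if y.toNat ≠ 0 then checkFarmA (cnt g c) (setCell g y.toNat x.toNat (-1)) (y.toNat - 1) x.toNat c else (setCell g y.toNat x.toNat (-1))) c + 1 ≤ cnt g c := by omega
  have E2 : stepA c (if y.toNat ≠ 0 then checkFarmA (cnt g c) (setCell g y.toNat x.toNat (-1)) (y.toNat - 1) x.toNat c else (setCell g y.toNat x.toNat (-1))) (y+1, x) = (if y.toNat ≠ (if y.toNat ≠ 0 then checkFarmA (cnt g c) (setCell g y.toNat x.toNat (-1)) (y.toNat - 1) x.toNat c else (setCell g y.toNat x.toNat (-1))).length - 1 then checkFarmA (cnt g c) (if y.toNat ≠ 0 then checkFarmA (cnt g c) (setCell g y.toNat x.toNat (-1)) (y.toNat - 1) x.toNat c else (setCell g y.toNat x.toNat (-1))) (y.toNat + 1) x.toNat c else (if y.toNat ≠ 0 then checkFarmA (cnt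 g c) (setCell g y.toNat x.toNat (-1)) (y.toNat - 1) x.toNat c else (setCell g y.toNat x.toNat (-1)))) :=
    stepA_down hc hy hx hcntT1
  have hshapeT2 : (if y.toNat ≠ (if y.toNat ≠ 0 then checkFarmA (cnt g c) (setCell g y.toNat x.toNat (-1)) (y.toNat - 1) x.toNat c else (setCell g y.toNat x.toNat (-1))).length - 1 then checkFarmA (cnt g c) (if y.toNat ≠ 0 then checkFarmA (cnt g c) (setCell g y.toNat x.toNat (-1)) (y.toNat - 1) x.toNat c else (setCell g y.toNat x.toNat (-1))) (y.toNat + 1) x.toNat c else (if y.toNat ≠ 0 then checkFarmA (cnt g c) (setCell g y.toNat x.toNat (-1)) (y.toNat - 1) x.toNat c else (setCell g y.toNat x.toNat (-1)))).map List.length = g.map List.length := shape_ifA hshapeT1 _ _ _ _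
  have hleT2 : cnt (if y.toNat ≠ (if y.toNat ≠ 0 then checkFarmA (cnt g c) (setCell g y.toNat x.toNat (-1)) (y.toNat - 1) x.toNat c else (setCell g y.toNat x.toNat (-1))).length - 1 then checkFarmA (cnt g c) (if y.toNat ≠ 0 then checkFarmA (cnt g c) (setCell g y.toNat x.toNat (-1)) (y.toNat - 1) x.toNat c else (setCell g y.toNat x.toNat (-1))) (y.toNat + 1) x.toNat c else (if y.toNat ≠ 0 then checkFarmA (cnt g c) (setCell g y.toNat x.toNat (-1)) (y.toNat - 1) x.toNat c else (setCell g y.toNat x.toNat (-1)))) c ≤ cnt (if y.toNat ≠ 0 then checkFarmA (cnt g c) (setCell g y.toNat x.toNat (-1)) (y.toNat - 1) x.toNat c else (setCell g y.toNat x.toNat (-1))) c := cnt_ifA hc _ _ _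
  have hcntT2 : cnt (if y.toNat ≠ (if y.toNat ≠ 0 then checkFarmA (cnt g c) (setCell g y.toNat x.toNat (-1)) (y.toNat - 1) x.toNat c else (setCell g y.toNat x.toNat (-1))).length - 1 then checkFarmA (cnt g c) (if y.toNat ≠ 0 then checkFarmA (cnt g c) (setCell g y.toNat x.toNat (-1)) (y.toNat - 1) x.toNat c else (setCell g y.toNat x.toNat (-1))) (y.toNat + 1) x.toNat c else (if y.toNat ≠ 0 then checkFarmA (cnt g c) (setCell g y.toNat x.toNat (-1)) (y.toNat - 1) x.toNat c else (setCell g y.toNat x.toNat (-1)))) c + 1 ≤ cnt g c := by omega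
  have E3 : stepA c (if y.toNat ≠ (if y.toNat ≠ 0 then checkFarmA (cnt g c) (setCell g y.toNat x.toNat (-1)) (y.toNat - 1) x.toNat c else (setCell g y.toNat x.toNat (-1))).length - 1 then checkFarmA (cnt g c) (if y.toNat ≠ 0 then checkFarmA (cnt g c) (setCell g y.toNat x.toNat (-1)) (y.toNat - 1) x.toNat c else (setCell g y.toNat x.toNat (-1))) (y.toNat + 1) x.toNat c else (if y.toNat ≠ 0 then checkFarmA (cnt g c) (setCell g y.toNat x.toNat (-1)) (y.toNat - 1) x.toNat c else (setCell g y.toNat x.toNat (-1)))) (y, x-1) = (if x.toNat ≠ 0 then checkFarmA (cnt g c) (if y.toNat ≠ (if y.toNat ≠ 0 then checkFarmA (cnt g c) (setCell g y.toNat x.toNat (-1)) (y.toNat - 1) x.toNat c else (setCell g y.toNat x.toNat (-1))).length - 1 then checkFarmA (cnt g c) (if y.toNat ≠ 0 then checkFarmA (cnt g c) (setCell g y.toNat x.toNat (-1)) (y.toNat - 1) x.toNat c else (setCell g y.toNat x.toNat (-1))) (y.toNat + 1) x.toNat c else (if y.toNat ≠ 0 then checkFarmA (cnt g c) (setCell g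 y.toNat x.toNat (-1)) (y.toNat - 1) x.toNat c else (setCell g y.toNat x.toNat (-1)))) y.toNat (x.toNat - 1) c else (if y.toNat ≠ (if y.toNat ≠ 0 then checkFarmA (cnt g c) (setCell g y.toNat x.toNat (-1)) (y.toNat - 1) x.toNat c else (setCell g y.toNat x.toNat (-1))).length - 1 then checkFarmA (cnt g c) (if y.toNat ≠ 0 then checkFarmA (cnt g c) (setCell g y.toNat x.toNat (-1)) (y.toNat - 1) x.toNat c else (setCell g y.toNat x.toNat (-1))) (y.toNat + 1) x.toNat c else (if y.toNat ≠ 0 then checkFarmA (cnt g c) (setCell g y.toNat x.toNat (-1)) (y.toNat - 1) x.toNat c else (setCell g y.toNat x.toNat (-1))))) := stepA_left hc hy hx hcntT2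
  have hshapeT3 : (if x.toNat ≠ 0 then checkFarmA (cnt g c) (if y.toNat ≠ (if y.toNat ≠ 0 then checkFarmA (cnt g c) (setCell g y.toNat x.toNat (-1)) (y.toNat - 1) x.toNat c else (setCell g y.toNat x.toNat (-1))).length - 1 then checkFarmA (cnt g c) (if y.toNat ≠ 0 then checkFarmA (cnt g c) (setCell g y.toNat x.toNat (-1)) (y.toNat - 1) x.toNat c else (setCell g y.toNat x.toNat (-1))) (y.toNat + 1) x.toNat c else (if y.toNat ≠ 0 then checkFarmA (cnt g c) (setCell g y.toNat x.toNat (-1)) (y.toNat - 1) x.toNat c else (setCell g y.toNat x.toNat (-1)))) y.toNat (x.toNat - 1) c else (if y.toNat ≠ (if y.toNat ≠ 0 then checkFarmA (cnt g c) (setCell g y.toNat x.toNat (-1)) (y.toNat - 1) x.toNat c else (setCell g y.toNat x.toNat (-1))).length - 1 then checkFarmA (cnt g c) (if y.toNat ≠ 0 then checkFarmA (cnt g c) (setCell g y.toNat x.toNat (-1)) (y.toNat - 1) x.toNat c else (setCell g y.toNat x.toNat (-1))) (y.toNat + 1) x.toNat c else (if y.toNat ≠ 0 then checkFarmA (cnt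 g c) (setCell g y.toNat x.toNat (-1)) (y.toNat - 1) x.toNat c else (setCell g y.toNat x.toNat (-1))))).map List.length = g.map List.length := shape_ifA hshapeT2 _ _ _ _
  have hleT3 : cnt (if x.toNat ≠ 0 then checkFarmA (cnt g c) (if y.toNat ≠ (if y.toNat ≠ 0 then checkFarmA (cnt g c) (setCell g y.toNat x.toNat (-1)) (y.toNat - 1) x.toNat c else (setCell g y.toNat x.toNat (-1))).length - 1 then checkFarmA (cnt g c) (if y.toNat ≠ 0 then checkFarmA (cnt g c) (setCell g y.toNat x.toNat (-1)) (y.toNat - 1) x.toNat c else (setCell g y.toNat x.toNat (-1))) (y.toNat + 1) x.toNat c else (if y.toNat ≠ 0 then checkFarmA (cnt g c) (setCell g y.toNat x.toNat (-1)) (y.toNat - 1) x.toNat c else (setCell g y.toNat x.toNat (-1)))) y.toNat (x.toNat - 1) c else (if y.toNat ≠ (if y.toNat ≠ 0 then checkFarmA (cnt g c) (setCell g y.toNat x.toNat (-1)) (y.toNat - 1) x.toNat c else (setCell g y.toNat x.toNat (-1))).length - 1 then checkFarmA (cnt g c) (if y.toNat ≠ 0 then checkFarmA (cnt g c) (setCell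 g y.toNat x.toNat (-1)) (y.toNat - 1) x.toNat c else (setCell g y.toNat x.toNat (-1))) (y.toNat + 1) x.toNat c else (if y.toNat ≠ 0 then checkFarmA (cnt g c) (setCell g y.toNat x.toNat (-1)) (y.toNat - 1) x.toNat c else (setCell g y.toNat x.toNat (-1))))) c ≤ cnt (if y.toNat ≠ (if y.toNat ≠ 0 then checkFarmA (cnt g c) (setCell g y.toNat x.toNat (-1)) (y.toNat - 1) x.toNat c else (setCell g y.toNat x.toNat (-1))).length - 1 then checkFarmA (cnt g c) (if y.toNat ≠ 0 then checkFarmA (cnt g c) (setCell g y.toNat x.toNat (-1)) (y.toNat - 1) x.toNat c else (setCell g y.toNat x.toNat (-1))) (y.toNat + 1) x.toNat c else (if y.toNat ≠ 0 then checkFarmA (cnt g c) (setCell g y.toNat x.toNat (-1)) (y.toNat - 1) x.toNat c else (setCell g y.toNat x.toNat (-1)))) c := cnt_ifA hc _ _ _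
  have hcntT3 : cnt (if x.toNat ≠ 0 then checkFarmA (cnt g c) (if y.toNat ≠ (if y.toNat ≠ 0 then checkFarmA (cnt g c) (setCell g y.toNat x.toNat (-1)) (y.toNat - 1) x.toNat c else (setCell g y.toNat x.toNat (-1))).length - 1 then checkFarmA (cnt g c) (if y.toNat ≠ 0 then checkFarmA (cnt g c) (setCell g y.toNat x.toNat (-1)) (y.toNat - 1) x.toNat c else (setCell g y.toNat x.toNat (-1))) (y.toNat + 1) x.toNat c else (if y.toNat ≠ 0 then checkFarmA (cnt g c) (setCell g y.toNat x.toNat (-1)) (y.toNat - 1) x.toNat c else (setCell g y.toNat x.toNat (-1)))) y.toNat (x.toNat - 1) c else (if y.toNat ≠ (if y.toNat ≠ 0 then checkFarmA (cnt g c) (setCell g y.toNat x.toNat (-1)) (y.toNat - 1) x.toNat c else (setCell g y.toNat x.toNat (-1))).length - 1 then checkFarmA (cnt g c) (if y.toNat ≠ 0 then checkFarmA (cnt g c) (setCell g y.toNat x.toNat (-1)) (y.toNat - 1) x.toNat c else (setCell g y.toNat x.toNat (-1))) (y.toNat + 1) x.toNat c else (if y.toNat ≠ 0 then checkFarmA (cnt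 g c) (setCell g y.toNat x.toNat (-1)) (y.toNat - 1) x.toNat c else (setCell g y.toNat x.toNat (-1))))) c + 1 ≤ cnt g c := by omega
  have E4 := stepA_right hc hy hx (G := (if x.toNat ≠ 0 then checkFarmA (cnt g c) (if y.toNat ≠ (if y.toNat ≠ 0 then checkFarmA (cnt g c) (setCell g y.toNat x.toNat (-1)) (y.toNat - 1) x.toNat c else (setCell g y.toNat x.toNat (-1))).length - 1 then checkFarmA (cnt g c) (if y.toNat ≠ 0 then checkFarmA (cnt g c) (setCell g y.toNat x.toNat (-1)) (y.toNat - 1) x.toNat c else (setCell g y.toNat x.toNat (-1))) (y.toNat + 1) x.toNat c else (if y.toNat ≠ 0 then checkFarmA (cnt g c) (setCell g y.toNat x.toNat (-1)) (y.toNat - 1) x.toNat c else (setCell g y.toNat x.toNat (-1)))) y.toNat (x.toNat - 1) c else (if y.toNat ≠ (if y.toNat ≠ 0 then checkFarmA (cnt g c) (setCell g y.toNat x.toNat (-1)) (y.toNat - 1) x.toNat c else (setCell g y.toNat x.toNat (-1))).length - 1 then checkFarmA (cnt g c) (if y.toNat ≠ 0 then checkFarmA (cnt g c) (setCell g y.toNat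 x.toNat (-1)) (y.toNat - 1) x.toNat c else (setCell g y.toNat x.toNat (-1))) (y.toNat + 1) x.toNat c else (if y.toNat ≠ 0 then checkFarmA (cnt g c) (setCell g y.toNat x.toNat (-1)) (y.toNat - 1) x.toNat c else (setCell g y.toNat x.toNat (-1)))))) hcntT3
  rw [E1, E2, E3, E4]
  simp only [stepA]
  rw [if_pos ⟨hy, hx⟩]
  simp only [checkFarmA, if_pos hcell.symm]

lemma stepA_skip {c : Int} (hc : c ≠ -1) {g : List (List Int)} {y x : Int}
    (hg : ¬(0 ≤ y ∧ y < (g.length : Int) ∧ 0 ≤ x ∧ x < (rowLen g y.toNat : Int) ∧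
           getCell g y.toNat x.toNat = c)) :
    stepA c g (y, x) = g := by
  simp only [stepA]
  split
  case isTrue hpos =>
    obtain ⟨hy, hx⟩ := hpos
    have hne : c ≠ getCell g y.toNat x.toNat := by
      by_cases h1 : y < (g.length : Int)
      · by_cases h2 : x < (rowLen g y.toNat : Int)
        · intro hEq; exact hg ⟨hy, h1, hx, h2, hEq.symm⟩
        · rw [getCell_of_rowLen_le (by omega)]; exact hc
      · rw [getCell_of_len_le _ (by omega)]; exact hc
    exact checkFarmA_nomatch hne _
  case isFalse => rfl

lemma fillB_eq {c : Int} (hc : c ≠ -1) :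
    ∀ (f : Nat) (g : List (List Int)) (s : List (Int × Int)), 4 * cnt g c + s.length ≤ f →
    fillB f g s c = s.foldl (stepA c) g := by
  intro f
  induction f with
  | zero =>
    intro g s h
    cases s with
    | nil => rfl
    | cons p rest => simp at h
  | succ n ih =>
    intro g s h
    match s with
    | [] => rfl
    | (y, x) :: rest =>
      simp only [fillB]
      split
      case isTrue hg =>
        obtain ⟨hy, hylt, hx, hxlt, hcell⟩ := hg
        have hcnt : cnt (setCell g y.toNat x.toNat (-1)) c + 1 = cnt g c := cnt_setCell hc hcell
        rw [ih _ _ (by simp at h ⊢; omega)]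
        simp only [List.foldl_cons]
        rw [← stepA_match hc hy hx hcell]
      case isFalse hg =>
        rw [ih _ _ (by simp at h ⊢; omega)]
        simp only [List.foldl_cons]
        rw [stepA_skip hc hg]

lemma foldl_congr_inv {σ : Type} (P : σ → Prop) (f g : σ → Nat → σ)
    (hstep : ∀ s j, P s → f s j = g s j ∧ P (f s j)) :
    ∀ (l : List Nat) (st : σ), P st → l.foldl f st = l.foldl g st ∧ P (l.foldl f st) := by
  intro l
  induction l with
  | nil => exact fun st h => ⟨rfl, h⟩
  | cons a l ih =>
    intro st h
    obtain ⟨he, hp⟩ := hstep st a h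
    simp only [List.foldl_cons]
    rw [← he]
    exact ih (f st a) hp

lemma cell_eq (v : List (List Int)) (i j : Nat) (s : List (List Int) × PySem.Dict Int Int)
    (hs : s.1.map List.length = v.map List.length) :
    ((if getCell s.1 i j = -1 then s
      else (checkFarmA (totalCells v + 1) s.1 i j (getCell s.1 i j),
            s.2.insert (getCell s.1 i j) (s.2.getD (getCell s.1 i j) 0 + 1)))
     = (if getCell s.1 i j = -1 then s
        else (fillB (4 * totalCells v + 5) s.1 [((i : Int), (j : Int))] (getCell s.1 i j),
              s.2.insert (getCell s.1 i j) (s.2.getD (getCell s.1 i j) 0 + 1))))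
    ∧ ((if getCell s.1 i j = -1 then s
        else (checkFarmA (totalCells v + 1) s.1 i j (getCell s.1 i j),
              s.2.insert (getCell s.1 i j) (s.2.getD (getCell s.1 i j) 0 + 1))).1.map List.length
        = v.map List.length) := by
  by_cases hcell : getCell s.1 i j = -1
  · rw [if_pos hcell, if_pos hcell]
    exact ⟨rfl, hs⟩
  · rw [if_neg hcell, if_neg hcell]
    have htot : totalCells s.1 = totalCells v := by unfold totalCells; rw [hs]
    have hcle : cnt s.1 (getCell s.1 i j) ≤ totalCells v := htot ▸ cnt_le_total s.1 _
    constructor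
    · have hfill : fillB (4 * totalCells v + 5) s.1 [((i : Int), (j : Int))] (getCell s.1 i j)
          = checkFarmA (totalCells v + 1) s.1 i j (getCell s.1 i j) := by
        rw [fillB_eq hcell _ s.1 _ (by simp; omega)]
        simp only [List.foldl_cons, List.foldl_nil, stepA]
        rw [if_pos ⟨Int.natCast_nonneg i, Int.natCast_nonneg j⟩]
        simp only [Int.toNat_natCast]
        exact checkFarmA_fuel hcell _ _ _ _ _ (le_refl _) (by omega)
      rw [hfill]
    · exact (shape_checkFarmA _ _ _ _ _).trans hs

lemma solution_eq (v : List (List Int)) : solution v = solution_alt v := by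
  have main := foldl_congr_inv
      (fun st : List (List Int) × PySem.Dict Int Int => st.1.map List.length = v.map List.length)
      (fun st i => List.foldl (fun st j => if getCell st.1 i j = -1 then st
            else (checkFarmA (totalCells v + 1) st.1 i j (getCell st.1 i j),
                  st.2.insert (getCell st.1 i j) (st.2.getD (getCell st.1 i j) 0 + 1))) st (List.range (rowLen st.1 i)))
      (fun st i => List.foldl (fun st j => if getCell st.1 i j = -1 then st
            else (fillB (4 * totalCells v + 5) st.1 [((i : Int), (j : Int))] (getCell st.1 i j),
                  st.2.insert (getCell st.1 i j) (st.2.getD (getCell st.1 i j) 0 + 1))) st (List.range (rowLen st.1 i)))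
      (fun s i hs => by
        exact foldl_congr_inv
          (fun st : List (List Int) × PySem.Dict Int Int => st.1.map List.length = v.map List.length)
          (fun st j => if getCell st.1 i j = -1 then st
              else (checkFarmA (totalCells v + 1) st.1 i j (getCell st.1 i j),
                    st.2.insert (getCell st.1 i j) (st.2.getD (getCell st.1 i j) 0 + 1)))
          (fun st j => if getCell st.1 i j = -1 then st
              else (fillB (4 * totalCells v + 5) st.1 [((i : Int), (j : Int))] (getCell st.1 i j),
                    st.2.insert (getCell st.1 i j) (st.2.getD (getCell st.1 i j) 0 + 1)))
          (fun s' j hs' => cell_eq v i j s' hs')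
          (List.range (rowLen s.1 i)) s hs)
      (List.range v.length) (v, PySem.Dict.empty) rfl
  unfold solution solution_alt
  simp only []
  rw [main.1]

-- ===== VERDICT (by name: the statement is the Claim_ definition above) =====
theorem solution_spec : Claim_equal_solution := by
  intro v _ _
  unfold Spec_solution
  exact solution_eq v
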